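-- pv_equiv track=rewrite | github.com/virtuald/pyhcl | src/hcl/api.py | isHcl
-- ===== SOURCE A (Python) =====
-- def isHcl(s):
--     '''
--         Detects whether a string is JSON or HCL
--
--         :param s: String that may contain HCL or JSON
--
--         :returns: True if HCL, False if JSON, raises ValueError
--                   if neither
--     '''
--     for c in s:
--         if c.isspace():
--             continue
--
--         if c == '{':
--             return False
--         else:
--             return True
--
--     raise ValueError("No HCL object could be decoded")
-- ===== SOURCE B (Python) =====
-- def isHcl(s):
--     words = s.split(None, 1)
--     if not words:
--         raise ValueError("No HCL object could be decoded")
--     return not words[0].startswith('{')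
-- ===== Notes on version B (the rewrite author's own statement) =====
-- stated objective: idiomatic
-- what changed: Replaces A's character-by-character skip-whitespace loop with a tokenize-then-test decomposition: split off the first whitespace-delimited token with s.split(None, 1) and test it with startswith('{'); no explicit loop over characters remains.
import Mathlib
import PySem

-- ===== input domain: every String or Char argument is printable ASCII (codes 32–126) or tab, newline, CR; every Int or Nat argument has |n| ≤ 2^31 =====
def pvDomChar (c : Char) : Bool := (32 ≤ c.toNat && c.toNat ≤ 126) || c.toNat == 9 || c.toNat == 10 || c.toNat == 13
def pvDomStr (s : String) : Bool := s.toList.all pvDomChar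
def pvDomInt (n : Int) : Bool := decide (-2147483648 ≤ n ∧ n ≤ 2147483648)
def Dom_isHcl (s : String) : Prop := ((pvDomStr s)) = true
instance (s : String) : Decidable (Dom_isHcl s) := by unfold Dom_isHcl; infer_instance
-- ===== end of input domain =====

-- B replaces A's character-by-character skip-whitespace loop with a tokenize-then-test
-- decomposition: split off the first whitespace-delimited token (s.split(None, 1)) and
-- test it with startswith('{') (objective: idiomatic). Both raise ValueError on
-- all-whitespace input (outside Pre_).

-- ===== PORT A =====
-- A: loop over the characters; skip whitespace; on the first non-space char return (c != '{').
-- If the loop ends (all whitespace), Python raises ValueError: outside Pre_, the port returns false.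
def isHclLoop (cs : List Char) : Bool :=
  match cs with
  | [] => false
  | c :: rest =>
      if PySem.Chars.isspace c then isHclLoop rest
      else if c = '{' then false else true

def isHcl (s : String) : Bool := isHclLoop s.toList

-- ===== PORT B =====
-- B: words = s.split(None, 1); empty words raises ValueError (outside Pre_, return false);
-- else return not words[0].startswith('{').
def isHcl_alt (s : String) : Bool :=
  match PySem.Str.split₀Max s 1 with
  | [] => false
  | w :: _ => !(PySem.Str.startswith w "{")

-- ===== PRECONDITION & SPEC =====
-- Pre_ excludes exactly the inputs where A (and B) raise ValueError: strings with no non-whitespace character.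
def Pre_isHcl (s : String) : Prop := (s.toList.all PySem.Chars.isspace) = false
instance (s : String) : Decidable (Pre_isHcl s) := by unfold Pre_isHcl; infer_instance
def pvWitness_isHcl : String := "  {a}"

def Spec_isHcl (s : String) (out : Bool) : Prop := out = isHcl_alt s
instance (s : String) (out : Bool) : Decidable (Spec_isHcl s out) := by unfold Spec_isHcl; infer_instance

-- ===== CLAIM (what is proved, stated in full; the proofs are below) =====
def Claim_equal_isHcl : Prop := ∀ (s : String), Dom_isHcl s → Pre_isHcl s → Spec_isHcl s (isHcl s)

-- ===== LEMMAS AND PROOFS =====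
-- A's loop equals the first-non-space-character test on dropWhile.
theorem isHclLoop_eq_dropWhile (cs : List Char) :
    isHclLoop cs = (match cs.dropWhile PySem.Chars.isspace with
                    | [] => false
                    | c :: _ => decide (c ≠ '{')) := by
  induction cs with
  | nil => rfl
  | cons c rest ih =>
      simp only [isHclLoop, List.dropWhile]
      by_cases h : PySem.Chars.isspace c
      · simp [h, ih]
      · simp [h]

-- Characterisation of the first token of split(None, 1) when a non-space char exists.
theorem split₀Max_one_cons (cs : List Char) (c : Char) (t : List Char)
    (h : cs.dropWhile PySem.Chars.isspace = c :: t) :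
    ∃ rest, PySem.Chars.split₀Max cs 1
      = (c :: t.takeWhile (fun x => !PySem.Chars.isspace x)) :: rest := by
  have hc : PySem.Chars.isspace c = false := by
    have := List.head_dropWhile_not (p := PySem.Chars.isspace) (l := cs)
      (by simp [h])
    simpa [h] using this
  have hlen : 1 ≤ cs.length := by
    rcases cs with _ | ⟨a, as⟩
    · simp at h
    · simp
  unfold PySem.Chars.split₀Max
  simp only [show ¬((1 : Int) < 0) by norm_num, if_false, Int.toNat_one]
  rcases Nat.exists_eq_add_of_le hlen with ⟨k, hk⟩
  rw [show cs.length + 1 = k + 2 by omega]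
  rw [PySem.Chars.split₀Max.go, h]
  simp only []
  rw [PySem.Chars.split₀Max.go]
  have htake : (c :: t).takeWhile (fun x => !PySem.Chars.isspace x)
      = c :: t.takeWhile (fun x => !PySem.Chars.isspace x) := by
    simp [hc]
  cases hdrop : (List.dropWhile (fun x => !PySem.Chars.isspace x) (c :: t)).dropWhile
      PySem.Chars.isspace with
  | nil => exact ⟨[], by simp [htake]⟩
  | cons d ds => exact ⟨[d :: ds], by simp [htake]⟩

-- ===== VERDICT (by name: the statement is the Claim_ definition above) =====
theorem isHcl_spec : Claim_equal_isHcl := by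
  intro s _ hpre
  unfold Spec_isHcl isHcl isHcl_alt
  rw [isHclLoop_eq_dropWhile]
  cases hdrop : s.toList.dropWhile PySem.Chars.isspace with
  | nil =>
      exfalso
      have : s.toList.all PySem.Chars.isspace = true := by
        rw [List.all_eq_true]
        intro x hx
        by_contra hxs
        have := List.dropWhile_eq_nil_iff.mp hdrop x hx
        simp_all
      simp [Pre_isHcl, this] at hpre
  | cons c t =>
      obtain ⟨rest, hr⟩ := split₀Max_one_cons s.toList c t hdrop
      have hm := PySem.Str.split₀Max_map_toList s 1
      rw [hr] at hm
      cases hs : PySem.Str.split₀Max s 1 with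
      | nil => rw [hs] at hm; simp at hm
      | cons w ws =>
          rw [hs] at hm
          simp only [List.map_cons, List.cons.injEq] at hm
          show decide (c ≠ '{') = !PySem.Str.startswith w "{"
          rw [PySem.Str.startswith_eq, hm.1]
          by_cases h : c = '{'
          · simp [h, PySem.Chars.startswith, List.isPrefixOf]
          · simp [h, PySem.Chars.startswith, List.isPrefixOf]
            exact fun hh => h hh.symm
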